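-- pv_equiv track=rewrite | github.com/hisashi-y/SLP | assignment/ngram/submission/4gram/4gram_train.py | ngram_training
-- ===== SOURCE A (Python) =====
-- def ngram_training(train, n):
--     counts = {} # ngramのカウント
--     context_counts = {} # n-1gramのカウント
--     for line in train: # 行ごとに読み込み
--         words = line.lower().split() # 各語のリスト、小文字に直している
--         words.insert(0, '<s>') # 各行の最初と最後に挿入
--         words.append('</s>')
--         for i in range(n - 1, len(words)-1):
--             ngram = ' '.join(words[i-(n - 1): i+1])
--             context_word = ' '.join(ngram.split()[:-1])
--             counts.setdefault(ngram, 0)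
--             counts[ngram] += 1
--             context_counts.setdefault(context_word, 0)
--             context_counts[context_word] += 1
--     return counts, context_counts
-- ===== SOURCE B (Python) =====
-- def ngram_training(train, n):
--     def line_grams(line):
--         words = ['<s>'] + line.lower().split() + ['</s>']
--         return [' '.join(words[i-(n - 1): i+1]) for i in range(n - 1, len(words)-1)]
--
--     def context(g):
--         return ' '.join(g.split()[:-1])
--
--     grams = [g for line in train for g in line_grams(line)]
--     counts = {}
--     for g in grams:
--         counts[g] = counts.get(g, 0) + 1
--     context_counts = {}
--     for g, k in counts.items():
--         context_counts[context(g)] = context_counts.get(context(g), 0) + k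
--     return counts, context_counts
-- ===== Notes on version B (the rewrite author's own statement) =====
-- stated objective: alternative
-- what changed: A makes one interleaved corpus pass updating both dicts per token position; B stages the work: it first materializes the whole n-gram stream as a list (per-line list comprehension), then counts it in a dedicated counting pass, and finally derives context_counts in a third pass over the distinct keys of counts, adding each n-gram's total to its context.
import Mathlib
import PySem

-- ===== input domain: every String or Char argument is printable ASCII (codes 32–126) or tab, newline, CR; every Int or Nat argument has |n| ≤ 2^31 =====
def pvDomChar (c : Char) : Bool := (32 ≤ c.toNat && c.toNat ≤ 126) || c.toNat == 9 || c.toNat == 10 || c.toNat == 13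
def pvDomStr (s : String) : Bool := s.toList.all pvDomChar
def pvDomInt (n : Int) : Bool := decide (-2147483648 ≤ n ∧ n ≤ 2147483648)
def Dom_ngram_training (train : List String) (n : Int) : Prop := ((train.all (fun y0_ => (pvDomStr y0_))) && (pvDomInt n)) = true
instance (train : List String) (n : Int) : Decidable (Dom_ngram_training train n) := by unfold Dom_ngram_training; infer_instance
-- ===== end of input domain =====

-- B restructures A: it first materializes the whole n-gram stream as one list, then counts it in a
-- dedicated pass, then derives context_counts in a third pass over the distinct ngram keys;
-- the returned values (dicts as assoc lists) are proved identical to A's interleaved single pass.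

-- ===== PORT A =====
def ngram_training (train : List String) (n : Int) : (List (String × Int)) × (List (String × Int)) :=
  let r := train.foldl (fun st line =>
    let words := (PySem.List.insert (PySem.Str.split₀ (PySem.Str.lower line)) 0 "<s>") ++ ["</s>"]
    (PySem.List.pyRange (n - 1) (PySem.List.len words - 1) 1).foldl (fun st2 i =>
      let ngram := PySem.Str.join " " (PySem.List.slice words (some (i - (n - 1))) (some (i + 1)))
      let context_word := PySem.Str.join " " (PySem.List.slice (PySem.Str.split₀ ngram) none (some (-1)))
      let c := st2.1.setdefault ngram 0
      let c := c.insert ngram (c.getD ngram 0 + 1)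
      let d := st2.2.setdefault context_word 0
      let d := d.insert context_word (d.getD context_word 0 + 1)
      (c, d)) st)
    ((PySem.Dict.empty, PySem.Dict.empty) : PySem.Dict String Int × PySem.Dict String Int)
  (r.1.items, r.2.items)

-- ===== PORT B =====
-- words = ['<s>'] + line.lower().split() + ['</s>']; one line's ngrams as a list comprehension
def pvLineGrams (n : Int) (line : String) : List String :=
  let words := "<s>" :: PySem.Str.split₀ (PySem.Str.lower line) ++ ["</s>"]
  (PySem.List.pyRange (n - 1) (PySem.List.len words - 1) 1).map
    (fun i => PySem.Str.join " " (PySem.List.slice words (some (i - (n - 1))) (some (i + 1))))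

-- context(g) = ' '.join(g.split()[:-1])
def pvContext (g : String) : String :=
  PySem.Str.join " " (PySem.List.slice (PySem.Str.split₀ g) none (some (-1)))

def ngram_training_alt (train : List String) (n : Int) : (List (String × Int)) × (List (String × Int)) :=
  let grams := train.flatMap (pvLineGrams n)
  let counts := grams.foldl (fun c g => c.insert g (c.getD g 0 + 1))
    (PySem.Dict.empty : PySem.Dict String Int)
  let context_counts := counts.items.foldl
    (fun d p => d.insert (pvContext p.1) (d.getD (pvContext p.1) 0 + p.2))
    (PySem.Dict.empty : PySem.Dict String Int)
  (counts.items, context_counts.items)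

-- ===== PRECONDITION & SPEC =====
def Spec_ngram_training (train : List String) (n : Int) (out : (List (String × Int)) × (List (String × Int))) : Prop := out = ngram_training_alt train n
instance (train : List String) (n : Int) (out : (List (String × Int)) × (List (String × Int))) : Decidable (Spec_ngram_training train n out) := by unfold Spec_ngram_training; infer_instance

-- ===== CLAIM (what is proved, stated in full; the proofs are below) =====
def Claim_equal_ngram_training : Prop := ∀ (train : List String) (n : Int), Dom_ngram_training train n → Spec_ngram_training train n (ngram_training train n)

-- ===== LEMMAS AND PROOFS =====

-- A's per-line word list and per-position ngram, as named proof helpers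
def pvWords (line : String) : List String :=
  (PySem.List.insert (PySem.Str.split₀ (PySem.Str.lower line)) 0 "<s>") ++ ["</s>"]

def pvGram (words : List String) (n i : Int) : String :=
  PySem.Str.join " " (PySem.List.slice words (some (i - (n - 1))) (some (i + 1)))

-- the per-line ngram stream and the whole-corpus ngram stream
def pvGrams (n : Int) (line : String) : List String :=
  (PySem.List.pyRange (n - 1) (PySem.List.len (pvWords line) - 1) 1).map (pvGram (pvWords line) n)

def pvGs (train : List String) (n : Int) : List String := train.flatMap (pvGrams n)

-- B's comprehension produces exactly A's per-line gram stream
theorem pv_lineGrams_eq (n : Int) (line : String) : pvLineGrams n line = pvGrams n line := by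
  unfold pvLineGrams pvGrams pvWords pvGram
  rw [PySem.List.insert_zero, List.cons_append]

-- setdefault-then-increment is the counting modify
theorem pv_setdefault_step (d : PySem.Dict String Int) (k : String) :
    (d.setdefault k 0).insert k ((d.setdefault k 0).getD k 0 + 1) = d.modify k 0 (· + 1) := by
  by_cases hk : d.contains k = true
  · rw [PySem.Dict.setdefault_of_contains d 0 hk]
    rfl
  · rw [PySem.Dict.setdefault_of_not_contains d 0 (by simpa using hk)]
    rw [PySem.Dict.getD_insert_self, PySem.Dict.insert_insert_self]
    show _ = d.insert k ((d.getD k 0) + 1)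
    rw [PySem.Dict.getD_of_not_contains d 0 (by simpa using hk)]

-- two inserts at distinct keys commute when the first key is already present
theorem pv_insert_comm (d : PySem.Dict String Int) (c c' : String) (hc : d.contains c = true)
    (hne : c' ≠ c) (a b : Int) : (d.insert c a).insert c' b = (d.insert c' b).insert c a := by
  apply PySem.Dict.ext
  by_cases hc' : d.contains c' = true
  · rw [PySem.Dict.items_insert_of_contains _ b
        (by rw [PySem.Dict.contains_insert]; simp [hc']),
      PySem.Dict.items_insert_of_contains _ a hc,
      PySem.Dict.items_insert_of_contains _ a
        (by rw [PySem.Dict.contains_insert]; simp [hc]),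
      PySem.Dict.items_insert_of_contains _ b hc']
    rw [List.map_map, List.map_map]
    apply List.map_congr_left
    intro p _
    simp only [Function.comp_apply]
    by_cases h1 : p.1 = c
    · simp [h1, Ne.symm hne]
    · by_cases h2 : p.1 = c'
      · simp [h2, hne]
      · simp [h1, h2]
  · rw [PySem.Dict.items_insert_of_not_contains _ b
        (by rw [PySem.Dict.contains_insert]; simp [hc', hne]),
      PySem.Dict.items_insert_of_contains _ a hc,
      PySem.Dict.items_insert_of_contains _ a
        (by rw [PySem.Dict.contains_insert]; simp [hc]),
      PySem.Dict.items_insert_of_not_contains _ b (by simpa using hc')]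
    rw [List.map_append]
    simp [hne]

-- two modifies at the same key compose
theorem pv_modify_modify (d : PySem.Dict String Int) (c : String) (f g : Int → Int) :
    (d.modify c 0 f).modify c 0 g = d.modify c 0 (fun x => g (f x)) := by
  have h1 : (d.modify c 0 f).modify c 0 g
      = (d.modify c 0 f).insert c (g ((d.modify c 0 f).getD c 0)) := rfl
  rw [h1, PySem.Dict.getD_modify_self]
  have h2 : d.modify c 0 f = d.insert c (f (d.getD c 0)) := rfl
  rw [h2, PySem.Dict.insert_insert_self]
  rfl

-- modify (+1) at a present key commutes with any counting modify
theorem pv_modify_comm (d : PySem.Dict String Int) (c c' : String) (hc : d.contains c = true)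
    (v : Int) :
    (d.modify c 0 (· + 1)).modify c' 0 (· + v) = (d.modify c' 0 (· + v)).modify c 0 (· + 1) := by
  by_cases h : c' = c
  · subst h
    rw [pv_modify_modify, pv_modify_modify]
    congr 1
    funext x
    omega
  · have e1 : (d.modify c 0 (· + 1)).modify c' 0 (· + v)
        = (d.insert c (d.getD c 0 + 1)).insert c'
            ((d.insert c (d.getD c 0 + 1)).getD c' 0 + v) := rfl
    have e2 : (d.modify c' 0 (· + v)).modify c 0 (· + 1)
        = (d.insert c' (d.getD c' 0 + v)).insert c
            ((d.insert c' (d.getD c' 0 + v)).getD c 0 + 1) := rfl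
    rw [e1, e2, PySem.Dict.getD_insert_of_ne d _ _ h,
      PySem.Dict.getD_insert_of_ne d _ _ (Ne.symm h)]
    exact pv_insert_comm d c c' hc h _ _

-- pushing a (+1) at a present key out of the context-accumulation fold
theorem pv_foldl_modify_comm (f : String → String) (l : List (String × Int))
    (d : PySem.Dict String Int) (c : String) (hc : d.contains c = true) :
    l.foldl (fun d p => d.modify (f p.1) 0 (· + p.2)) (d.modify c 0 (· + 1))
      = (l.foldl (fun d p => d.modify (f p.1) 0 (· + p.2)) d).modify c 0 (· + 1) := by
  induction l generalizing d with
  | nil => rfl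
  | cons p t ih =>
    simp only [List.foldl_cons]
    rw [pv_modify_comm d c (f p.1) hc p.2]
    apply ih
    show ((d.insert (f p.1) _).contains c : Bool) = true
    rw [PySem.Dict.contains_insert]
    simp [hc]

-- splitting a counting modify
theorem pv_modify_split (d : PySem.Dict String Int) (c : String) (v : Int) :
    d.modify c 0 (· + (v + 1)) = (d.modify c 0 (· + v)).modify c 0 (· + 1) := by
  rw [pv_modify_modify]
  congr 1
  funext x
  omega

-- CORE: aggregating counts over the distinct keys of a counter equals counting the mapped stream
theorem pv_core (f : String → String) (gs : List String) :
    (PySem.Dict.counter gs).items.foldl (fun d p => d.modify (f p.1) 0 (· + p.2))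
        (PySem.Dict.empty : PySem.Dict String Int)
      = PySem.Dict.counter (gs.map f) := by
  induction gs using List.reverseRecOn with
  | nil => rfl
  | append_singleton gs g ih =>
    rw [List.map_append, List.map_singleton, PySem.Dict.counter_append_singleton,
      PySem.Dict.counter_append_singleton, ← ih]
    by_cases hg : (PySem.Dict.counter gs).contains g = true
    · -- g already counted: its entry's value is bumped in place
      obtain ⟨p, hp, hpk⟩ := List.mem_map.1
        ((PySem.Dict.contains_iff_mem_keys _ _).1 hg)
      obtain ⟨pk, pv⟩ := p
      simp only [] at hpk
      subst hpk
      obtain ⟨s, t, hst⟩ := List.append_of_mem hp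
      have hnd : ((PySem.Dict.counter gs).items.map Prod.fst).Nodup :=
        PySem.Dict.nodup_keys_counter gs
      rw [hst] at hnd
      simp only [List.map_append, List.map_cons] at hnd
      obtain ⟨hn1, hn2, hn3⟩ := List.nodup_append.1 hnd
      have hgt : pk ∉ t.map Prod.fst := (List.nodup_cons.1 hn2).1
      have hgs : pk ∉ s.map Prod.fst := fun hm => hn3 pk hm pk List.mem_cons_self rfl
      have hv : (PySem.Dict.counter gs).getD pk 0 = pv :=
        PySem.Dict.getD_of_mem_items _ hp (PySem.Dict.nodup_keys_counter gs) 0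
      show ((PySem.Dict.counter gs).insert pk _).items.foldl _ _ = _
      rw [PySem.Dict.items_insert_of_contains _ _ hg, hst, hv]
      rw [List.map_append, List.map_cons]
      have hmap : ∀ (u : List (String × Int)), pk ∉ u.map Prod.fst →
          u.map (fun q => if (q.1 == pk) = true then (pk, pv + 1) else q) = u := by
        intro u hu
        conv_rhs => rw [← List.map_id u]
        apply List.map_congr_left
        intro q hq
        have : q.1 ≠ pk := fun h => hu (List.mem_map.2 ⟨q, hq, h⟩)
        simp [this]
      rw [hmap s hgs, hmap t hgt]
      have hif : (if (((pk, pv) : String × Int).1 == pk) = true then (pk, pv + 1) else (pk, pv))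
          = (pk, pv + 1) := by simp
      rw [hif]
      rw [List.foldl_append, List.foldl_append, List.foldl_cons, List.foldl_cons]
      show List.foldl (fun d p => d.modify (f p.1) 0 (· + p.2))
            ((List.foldl (fun d p => d.modify (f p.1) 0 (· + p.2)) PySem.Dict.empty s).modify
              (f pk) 0 (· + (pv + 1))) t
          = (List.foldl (fun d p => d.modify (f p.1) 0 (· + p.2))
              ((List.foldl (fun d p => d.modify (f p.1) 0 (· + p.2)) PySem.Dict.empty s).modify
                (f pk) 0 (· + pv)) t).modify (f pk) 0 (· + 1)
      rw [pv_modify_split]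
      apply pv_foldl_modify_comm
      show (((List.foldl (fun d p => d.modify (f p.1) 0 (· + p.2)) PySem.Dict.empty s).insert
          (f pk) _).contains (f pk)) = true
      rw [PySem.Dict.contains_insert]
      simp
    · -- fresh ngram: its entry is appended with count 1
      show ((PySem.Dict.counter gs).insert g _).items.foldl _ _ = _
      rw [PySem.Dict.items_insert_of_not_contains _ _ (by simpa using hg),
        PySem.Dict.getD_of_not_contains _ _ (by simpa using hg)]
      rw [List.foldl_append, List.foldl_cons, List.foldl_nil]
      show ((PySem.Dict.counter gs).items.foldl (fun d p => d.modify (f p.1) 0 (· + p.2))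
          PySem.Dict.empty).modify (f g) 0 (· + (0 + 1)) = _
      congr 1

-- the two split accumulators of A's loop, as named functions
def pvFm (n : Int) (c : PySem.Dict String Int) (line : String) : PySem.Dict String Int :=
  (PySem.List.pyRange (n - 1) (PySem.List.len (pvWords line) - 1) 1).foldl
    (fun c i => c.modify (pvGram (pvWords line) n i) 0 (· + 1)) c

def pvGm (n : Int) (d : PySem.Dict String Int) (line : String) : PySem.Dict String Int :=
  (PySem.List.pyRange (n - 1) (PySem.List.len (pvWords line) - 1) 1).foldl
    (fun d i => d.modify (pvContext (pvGram (pvWords line) n i)) 0 (· + 1)) d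

-- A's paired fold splits into the two independent counting folds
theorem pv_A_split (train : List String) (n : Int) :
    train.foldl (fun st line =>
      (PySem.List.pyRange (n - 1) (PySem.List.len (pvWords line) - 1) 1).foldl (fun st2 i =>
        ((st2.1.setdefault (pvGram (pvWords line) n i) 0).insert (pvGram (pvWords line) n i)
          ((st2.1.setdefault (pvGram (pvWords line) n i) 0).getD (pvGram (pvWords line) n i) 0 + 1),
         (st2.2.setdefault (pvContext (pvGram (pvWords line) n i)) 0).insert (pvContext (pvGram (pvWords line) n i))
          ((st2.2.setdefault (pvContext (pvGram (pvWords line) n i)) 0).getD (pvContext (pvGram (pvWords line) n i)) 0 + 1))) st)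
      ((PySem.Dict.empty, PySem.Dict.empty) : PySem.Dict String Int × PySem.Dict String Int)
    = (train.foldl (pvFm n) PySem.Dict.empty, train.foldl (pvGm n) PySem.Dict.empty) := by
  rw [PySem.List.foldl_congr_mem train _
      (fun (st : PySem.Dict String Int × PySem.Dict String Int) line =>
        (pvFm n st.1 line, pvGm n st.2 line)) _
      (by
        intro st line _
        rw [PySem.List.foldl_congr_mem
            (PySem.List.pyRange (n - 1) (PySem.List.len (pvWords line) - 1) 1) _
            (fun (st2 : PySem.Dict String Int × PySem.Dict String Int) i =>
              (st2.1.modify (pvGram (pvWords line) n i) 0 (· + 1),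
               st2.2.modify (pvContext (pvGram (pvWords line) n i)) 0 (· + 1))) st
            (by intro st2 i _
                rw [pv_setdefault_step, pv_setdefault_step])]
        rw [PySem.List.foldl_prod_mk
            (fun c i => PySem.Dict.modify c (pvGram (pvWords line) n i) 0 (· + 1))
            (fun d i => PySem.Dict.modify d (pvContext (pvGram (pvWords line) n i)) 0 (· + 1))
            (PySem.List.pyRange (n - 1) (PySem.List.len (pvWords line) - 1) 1) st.1 st.2]
        rfl)]
  rw [PySem.List.foldl_prod_mk (pvFm n) (pvGm n) train PySem.Dict.empty PySem.Dict.empty]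

-- the counting folds are counters of the flattened gram stream
theorem pv_counts_eq (train : List String) (n : Int) :
    train.foldl (pvFm n) PySem.Dict.empty = PySem.Dict.counter (pvGs train n) := by
  rw [PySem.Dict.counter_eq_foldl]
  unfold pvGs
  rw [List.foldl_flatMap]
  apply PySem.List.foldl_congr_mem
  intro c line _
  unfold pvFm pvGrams
  rw [List.foldl_map]

theorem pv_ctx_eq (train : List String) (n : Int) :
    train.foldl (pvGm n) PySem.Dict.empty = PySem.Dict.counter ((pvGs train n).map pvContext) := by
  rw [PySem.Dict.counter_eq_foldl, List.foldl_map]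
  unfold pvGs
  rw [List.foldl_flatMap]
  apply PySem.List.foldl_congr_mem
  intro d line _
  unfold pvGm pvGrams
  rw [List.foldl_map]

-- ===== VERDICT (by name: the statement is the Claim_ definition above) =====
theorem ngram_training_spec : Claim_equal_ngram_training := by
  intro train n _
  show ngram_training train n = ngram_training_alt train n
  have hA : ngram_training train n
      = ((train.foldl (fun st line =>
          (PySem.List.pyRange (n - 1) (PySem.List.len (pvWords line) - 1) 1).foldl (fun st2 i =>
            ((st2.1.setdefault (pvGram (pvWords line) n i) 0).insert (pvGram (pvWords line) n i)
              ((st2.1.setdefault (pvGram (pvWords line) n i) 0).getD (pvGram (pvWords line) n i) 0 + 1),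
             (st2.2.setdefault (pvContext (pvGram (pvWords line) n i)) 0).insert (pvContext (pvGram (pvWords line) n i))
              ((st2.2.setdefault (pvContext (pvGram (pvWords line) n i)) 0).getD (pvContext (pvGram (pvWords line) n i)) 0 + 1))) st)
          ((PySem.Dict.empty, PySem.Dict.empty) : PySem.Dict String Int × PySem.Dict String Int)).1.items,
         (train.foldl (fun st line =>
          (PySem.List.pyRange (n - 1) (PySem.List.len (pvWords line) - 1) 1).foldl (fun st2 i =>
            ((st2.1.setdefault (pvGram (pvWords line) n i) 0).insert (pvGram (pvWords line) n i)
              ((st2.1.setdefault (pvGram (pvWords line) n i) 0).getD (pvGram (pvWords line) n i) 0 + 1),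
             (st2.2.setdefault (pvContext (pvGram (pvWords line) n i)) 0).insert (pvContext (pvGram (pvWords line) n i))
              ((st2.2.setdefault (pvContext (pvGram (pvWords line) n i)) 0).getD (pvContext (pvGram (pvWords line) n i)) 0 + 1))) st)
          ((PySem.Dict.empty, PySem.Dict.empty) : PySem.Dict String Int × PySem.Dict String Int)).2.items) := rfl
  have hgs : train.flatMap (pvLineGrams n) = pvGs train n := by
    unfold pvGs
    rw [funext (pv_lineGrams_eq n)]
  have hB : ngram_training_alt train n
      = ((PySem.Dict.counter (pvGs train n)).items,
         ((PySem.Dict.counter (pvGs train n)).items.foldl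
            (fun d p => d.modify (pvContext p.1) 0 (· + p.2)) PySem.Dict.empty).items) := by
    show (((train.flatMap (pvLineGrams n)).foldl (fun c g => c.insert g (c.getD g 0 + 1))
            (PySem.Dict.empty : PySem.Dict String Int)).items, _) = _
    rw [hgs, PySem.Dict.foldl_insert_getD_add_one_eq_counter]
    rfl
  rw [hA, hB, pv_A_split train n]
  simp only []
  rw [pv_counts_eq train n, pv_ctx_eq train n, pv_core pvContext (pvGs train n)]
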